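-- pv_equiv track=rewrite | github.com/nbardy/WordRelationship-finder | relationshipFinder.py | diagnose
-- ===== SOURCE A (Python) =====
-- def diagnose(string):
--    """
--    Accepts a string
--    Returns a list of Wordmaps
--    A word map is a map with the keys ('before','word','after)
--    """
--
--    words = string.split(' ')
--    if len(words) == 0:
--       return None
--    if len(words) == 1:
--       return [{'before': None, 'word': words[0], 'after': None}]
--
--    wordmaplist = []
--    for index in range(len(words)):
--       if index == 0:
--          wordmaplist.append({'before': None, 'word': words[index], 'after': words[index+1]})
--       elif index == len(words) - 1:
--          wordmaplist.append({'before': words[index-1], 'word': words[index], 'after': None})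
--       else :
--          wordmaplist.append({'before': words[index-1], 'word': words[index], 'after': words[index+1]})
--
--    return wordmaplist
-- ===== SOURCE B (Python) =====
-- def diagnose(string):
--     """Same result as A via shifted lists zipped together: no index branching."""
--     words = string.split(' ')
--     befores = [None] + words[:-1]
--     afters = words[1:] + [None]
--     return [{'before': b, 'word': w, 'after': a}
--             for b, w, a in zip(befores, words, afters)]
-- ===== Notes on version B (the rewrite author's own statement) =====
-- stated objective: simpler
-- what changed: Replaces the index loop with three first/last/middle branches by two shifted lists ([None]+words[:-1] and words[1:]+[None]) zipped with words into one uniform comprehension, which also absorbs the single-word special case.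
import Mathlib
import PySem

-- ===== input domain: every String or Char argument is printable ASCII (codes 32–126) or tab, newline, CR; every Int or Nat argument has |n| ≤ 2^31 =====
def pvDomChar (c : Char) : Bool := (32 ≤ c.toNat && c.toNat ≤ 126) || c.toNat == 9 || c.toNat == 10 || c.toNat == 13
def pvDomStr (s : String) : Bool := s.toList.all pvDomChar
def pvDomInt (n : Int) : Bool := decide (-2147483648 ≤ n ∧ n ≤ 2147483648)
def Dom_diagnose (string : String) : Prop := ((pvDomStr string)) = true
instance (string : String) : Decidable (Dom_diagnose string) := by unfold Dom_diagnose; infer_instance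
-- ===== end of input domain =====

-- B builds the per-word maps from two shifted lists zipped with the words, instead of A's index loop with first/last/middle branches (simpler decomposition, same cost).


-- ===== PORT A =====
def diagnose (string : String) : List (List (String × Option String)) :=
  let words := (PySem.Str.split? string " ").getD []
  if words.length = 0 then
    []  -- unreachable: split(' ') always yields at least one piece (Python A returns None here)
  else if words.length = 1 then
    [[("before", none), ("word", some (PySem.List.pyGetD words 0 "")), ("after", none)]]
  else
    (PySem.List.pyRange 0 (words.length : Int) 1).foldl (fun wordmaplist index =>
      if index = 0 then
        wordmaplist ++ [[("before", none),
                         ("word", some (PySem.List.pyGetD words index "")),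
                         ("after", some (PySem.List.pyGetD words (index + 1) ""))]]
      else if index = (words.length : Int) - 1 then
        wordmaplist ++ [[("before", some (PySem.List.pyGetD words (index - 1) "")),
                         ("word", some (PySem.List.pyGetD words index "")),
                         ("after", none)]]
      else
        wordmaplist ++ [[("before", some (PySem.List.pyGetD words (index - 1) "")),
                         ("word", some (PySem.List.pyGetD words index "")),
                         ("after", some (PySem.List.pyGetD words (index + 1) ""))]]) []

-- ===== PORT B =====
def diagnose_alt (string : String) : List (List (String × Option String)) :=
  let words := (PySem.Str.split? string " ").getD []
  let befores := [none] ++ (PySem.List.slice words none (some (-1))).map some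
  let afters := (PySem.List.slice words (some 1) none).map some ++ [none]
  ((befores.zip words).zip afters).map (fun bwa =>
    [("before", bwa.1.1), ("word", some bwa.1.2), ("after", bwa.2)])

-- ===== PRECONDITION & SPEC =====
def Spec_diagnose (string : String) (out : List (List (String × Option String))) : Prop := out = diagnose_alt string
instance (string : String) (out : List (List (String × Option String))) : Decidable (Spec_diagnose string out) := by unfold Spec_diagnose; infer_instance

-- ===== CLAIM (what is proved, stated in full; the proofs are below) =====
def Claim_equal_diagnose : Prop := ∀ (string : String), Dom_diagnose string → Spec_diagnose string (diagnose string)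

-- ===== LEMMAS AND PROOFS =====

-- helpers used only by the proofs: the common body of both ports after splitting
def coreA (words : List String) : List (List (String × Option String)) :=
  if words.length = 0 then []
  else if words.length = 1 then
    [[("before", none), ("word", some (PySem.List.pyGetD words 0 "")), ("after", none)]]
  else
    (PySem.List.pyRange 0 (words.length : Int) 1).foldl (fun wordmaplist index =>
      if index = 0 then
        wordmaplist ++ [[("before", none),
                         ("word", some (PySem.List.pyGetD words index "")),
                         ("after", some (PySem.List.pyGetD words (index + 1) ""))]]
      else if index = (words.length : Int) - 1 then
        wordmaplist ++ [[("before", some (PySem.List.pyGetD words (index - 1) "")),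
                         ("word", some (PySem.List.pyGetD words index "")),
                         ("after", none)]]
      else
        wordmaplist ++ [[("before", some (PySem.List.pyGetD words (index - 1) "")),
                         ("word", some (PySem.List.pyGetD words index "")),
                         ("after", some (PySem.List.pyGetD words (index + 1) ""))]]) []

def coreB (words : List String) : List (List (String × Option String)) :=
  let befores := [none] ++ (PySem.List.slice words none (some (-1))).map some
  let afters := (PySem.List.slice words (some 1) none).map some ++ [none]
  ((befores.zip words).zip afters).map (fun bwa =>
    [("before", bwa.1.1), ("word", some bwa.1.2), ("after", bwa.2)])

def fA (n : Int) (words : List String) (index : Int) : List (String × Option String) :=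
  if index = 0 then
    [("before", none), ("word", some (PySem.List.pyGetD words index "")),
     ("after", some (PySem.List.pyGetD words (index + 1) ""))]
  else if index = n - 1 then
    [("before", some (PySem.List.pyGetD words (index - 1) "")),
     ("word", some (PySem.List.pyGetD words index "")), ("after", none)]
  else
    [("before", some (PySem.List.pyGetD words (index - 1) "")),
     ("word", some (PySem.List.pyGetD words index "")),
     ("after", some (PySem.List.pyGetD words (index + 1) ""))]

lemma coreA_map (words : List String) (h : 2 ≤ words.length) :
    coreA words = (List.range words.length).map (fun (k : Nat) => fA (words.length : Int) words ((k : Nat) : Int)) := by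
  unfold coreA
  rw [if_neg (by omega), if_neg (by omega)]
  have hbody : (fun (wordmaplist : List (List (String × Option String))) (index : Int) =>
      if index = 0 then
        wordmaplist ++ [[("before", (none : Option String)),
                         ("word", some (PySem.List.pyGetD words index "")),
                         ("after", some (PySem.List.pyGetD words (index + 1) ""))]]
      else if index = (words.length : Int) - 1 then
        wordmaplist ++ [[("before", some (PySem.List.pyGetD words (index - 1) "")),
                         ("word", some (PySem.List.pyGetD words index "")),
                         ("after", none)]]
      else
        wordmaplist ++ [[("before", some (PySem.List.pyGetD words (index - 1) "")),
                         ("word", some (PySem.List.pyGetD words index "")),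
                         ("after", some (PySem.List.pyGetD words (index + 1) ""))]])
      = (fun wordmaplist index => wordmaplist ++ [fA (words.length : Int) words index]) := by
    funext acc i
    unfold fA
    split_ifs <;> rfl
  rw [hbody, PySem.List.foldl_append_singleton_eq_map, PySem.List.pyRange_zero_natCast,
      List.map_map]
  simp [Function.comp]

lemma core_eq (words : List String) : coreA words = coreB words := by
  match words with
  | [] => rfl
  | [w] => rfl
  | w0 :: w1 :: ws =>
    set words := w0 :: w1 :: ws with hw
    have h2 : 2 ≤ words.length := by simp [hw]
    have htl : words.tail.length = words.length - 1 := by simp [hw]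
    have hdl : words.dropLast.length = words.length - 1 := by simp
    rw [coreA_map words h2]
    unfold coreB
    rw [PySem.List.slice_to_neg_one, PySem.List.slice_from_one]
    apply List.ext_getElem
    · simp [hw]
    · intro i hi1 hi2
      have hi : i < words.length := by simpa using hi1
      rw [List.getElem_map, List.getElem_range, List.getElem_map, List.getElem_zip,
          List.getElem_zip]
      unfold fA
      by_cases h0 : i = 0
      · subst h0
        rw [if_pos (by norm_num)]
        have hb : (([none] ++ words.dropLast.map some))[0]'(by simp) = none := by
          rw [List.getElem_append_left (by simp)]; rfl
        have ha : (words.tail.map some ++ [(none : Option String)])[0]'(by simp)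
            = some (words[1]'(by omega)) := by
          rw [List.getElem_append_left (by simp; omega)]
          simp [List.getElem_tail]
        rw [hb, ha]
        have g0 : PySem.List.pyGetD words ((0:Nat):Int) "" = words[0]'(by omega) :=
          PySem.List.pyGetD_ofNat words 0 "" (by omega)
        have g1 : PySem.List.pyGetD words (((0:Nat):Int) + 1) "" = words[1]'(by omega) := by
          have : (((0:Nat):Int) + 1) = ((1:Nat):Int) := by norm_num
          rw [this]; exact PySem.List.pyGetD_ofNat words 1 "" (by omega)
        push_cast at g0 g1 ⊢
        rw [g0, g1]
      · have hipos : 0 < i := Nat.pos_of_ne_zero h0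
        rw [if_neg (by exact_mod_cast h0)]
        have hb : (([none] ++ words.dropLast.map some))[i]'(by simp; omega)
            = some (words[i-1]'(by omega)) := by
          rw [List.getElem_append_right (by simp; omega)]
          simp [List.getElem_dropLast]
        have gprev : PySem.List.pyGetD words ((i:Int) - 1) "" = words[i-1]'(by omega) := by
          have : ((i:Int) - 1) = ((i-1 : Nat) : Int) := by omega
          rw [this]; exact PySem.List.pyGetD_ofNat words (i-1) "" (by omega)
        have gcur : PySem.List.pyGetD words (i:Int) "" = words[i]'hi :=
          PySem.List.pyGetD_ofNat words i "" hi
        by_cases hl : i = words.length - 1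
        · rw [if_pos (by omega)]
          have ha : (words.tail.map some ++ [(none : Option String)])[i]'(by simp; omega) = none := by
            rw [List.getElem_append_right (by simp; omega)]
            simp
          rw [hb, ha, gprev, gcur]
        · rw [if_neg (by omega)]
          have ha : (words.tail.map some ++ [(none : Option String)])[i]'(by simp; omega)
              = some (words[i+1]'(by omega)) := by
            rw [List.getElem_append_left (by simp; omega)]
            simp [List.getElem_tail]
          have gnext : PySem.List.pyGetD words ((i:Int) + 1) "" = words[i+1]'(by omega) := by
            have : ((i:Int) + 1) = ((i+1 : Nat) : Int) := by omega
            rw [this]; exact PySem.List.pyGetD_ofNat words (i+1) "" (by omega)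
          rw [hb, ha, gprev, gcur, gnext]

lemma diagnose_eq_coreA (s : String) : diagnose s = coreA ((PySem.Str.split? s " ").getD []) := rfl

lemma diagnose_alt_eq_coreB (s : String) : diagnose_alt s = coreB ((PySem.Str.split? s " ").getD []) := rfl

-- ===== VERDICT (by name: the statement is the Claim_ definition above) =====
theorem diagnose_spec : Claim_equal_diagnose := by
  intro s _
  unfold Spec_diagnose
  rw [diagnose_eq_coreA, diagnose_alt_eq_coreB, core_eq]
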